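-- pv_equiv track=rewrite | github.com/bioShaun/nf-reseq-om | script/extractTableFromsnpEff.py | extractAnnotaion
-- ===== SOURCE A (Python) =====
-- def extractAnnotaion(strs):
--     AlleType = []
--     AlleGene = []
--     AlleLocu = []
--     for annStr in strs.split(","):
--         annDetailArray = strs.split("|")
--         AlleType.append(annDetailArray[1])
--         AlleGene.append(annDetailArray[3])
--         AlleLocu.append(annDetailArray[9])
--
--     AlleTypeRE = '|'.join(list(set(AlleType)))
--     AlleGeneRE = '|'.join(list(set(AlleGene)))
--     AlleLocuRE = '|'.join(list(set(AlleLocu)))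
--     return([AlleTypeRE, AlleGeneRE, AlleLocuRE])
-- ===== SOURCE B (Python) =====
-- def extractAnnotaion(strs):
--     # A re-splits the SAME whole string every loop iteration, so each of the three
--     # lists is n copies of one value and set() collapses it; split once and index.
--     parts = strs.split("|")
--     return [parts[1], parts[3], parts[9]]
-- ===== Notes on version B (the rewrite author's own statement) =====
-- stated objective: simpler
-- what changed: B drops A's per-comma loop and the set/join dedup entirely: A re-splits the whole input by '|' on every iteration and appends the same three fields each time, so the deduplicated joins are just those three fields; B splits once and returns [parts[1], parts[3], parts[9]].
import Mathlib
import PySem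

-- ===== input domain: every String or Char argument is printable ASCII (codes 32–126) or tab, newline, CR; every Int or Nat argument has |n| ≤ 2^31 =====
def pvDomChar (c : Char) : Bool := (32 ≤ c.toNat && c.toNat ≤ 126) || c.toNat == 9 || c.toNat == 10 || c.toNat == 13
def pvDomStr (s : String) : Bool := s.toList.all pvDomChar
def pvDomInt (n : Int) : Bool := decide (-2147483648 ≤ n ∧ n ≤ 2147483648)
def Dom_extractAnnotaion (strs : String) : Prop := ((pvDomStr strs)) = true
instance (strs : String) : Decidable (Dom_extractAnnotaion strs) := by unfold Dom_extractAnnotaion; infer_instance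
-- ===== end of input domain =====

-- B splits the input by '|' once and returns fields 1, 3, 9 directly: A's per-comma loop
-- re-splits the same whole string every iteration, so its set/join dedup collapses to those
-- same three fields; the loop and the dedup are dropped.


-- ===== PORT A =====
-- strs.split(sep) with sep ≠ "" is PySem.Chars.splitOn on the code points (exact).
-- (PySem.List.pyGet? …).getD "" : the .getD "" is never reached under Pre_ (the IndexError
-- inputs are excluded there).  Python's list(set(...)) order is arbitrary, but under A's loop
-- all appended elements are equal, so each set is a singleton and the join is exact.
def extractAnnotaion (strs : String) : List String :=
  let pieces := (PySem.Chars.splitOn strs.toList ",".toList).map String.ofList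
  let st := pieces.foldl
    (fun (acc : List String × List String × List String) _annStr =>
      let annDetailArray := (PySem.Chars.splitOn strs.toList "|".toList).map String.ofList
      (acc.1 ++ [(PySem.List.pyGet? annDetailArray 1).getD ""],
       acc.2.1 ++ [(PySem.List.pyGet? annDetailArray 3).getD ""],
       acc.2.2 ++ [(PySem.List.pyGet? annDetailArray 9).getD ""]))
    ([], [], [])
  [PySem.Str.join "|" (PySem.Set.ofList st.1),
   PySem.Str.join "|" (PySem.Set.ofList st.2.1),
   PySem.Str.join "|" (PySem.Set.ofList st.2.2)]

-- ===== PORT B =====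
def extractAnnotaion_alt (strs : String) : List String :=
  let parts := (PySem.Chars.splitOn strs.toList "|".toList).map String.ofList
  [(PySem.List.pyGet? parts 1).getD "",
   (PySem.List.pyGet? parts 3).getD "",
   (PySem.List.pyGet? parts 9).getD ""]

-- ===== PRECONDITION & SPEC =====
-- Pre_ excludes exactly the inputs where Python A raises IndexError: fewer than 10
-- pipe-separated fields (parts[9] out of range).  B raises there too.
def Pre_extractAnnotaion (strs : String) : Prop :=
  10 ≤ (PySem.Chars.splitOn strs.toList "|".toList).length
instance (strs : String) : Decidable (Pre_extractAnnotaion strs) := by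
  unfold Pre_extractAnnotaion; infer_instance
def pvWitness_extractAnnotaion : String := "a|b|c|d|e|f|g|h|i|j"
def Spec_extractAnnotaion (strs : String) (out : List String) : Prop := out = extractAnnotaion_alt strs
instance (strs : String) (out : List String) : Decidable (Spec_extractAnnotaion strs out) := by
  unfold Spec_extractAnnotaion; infer_instance

-- ===== CLAIM (what is proved, stated in full; the proofs are below) =====
def Claim_equal_extractAnnotaion : Prop := ∀ (strs : String), Dom_extractAnnotaion strs → Pre_extractAnnotaion strs → Spec_extractAnnotaion strs (extractAnnotaion strs)

-- ===== LEMMAS AND PROOFS =====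

-- splitOn.go always delivers at least one more piece than the accumulator holds.
lemma pv_go_len : ∀ (fuel : Nat) (sep l cur : List Char) (acc : List (List Char)),
    1 + acc.length ≤ (PySem.Chars.splitOn.go sep fuel l cur acc).length := by
  intro fuel
  induction fuel with
  | zero => intro sep l cur acc; simp [PySem.Chars.splitOn.go]; omega
  | succ n ih =>
    intro sep l cur acc
    cases l with
    | nil => simp [PySem.Chars.splitOn.go]; omega
    | cons c rest =>
      rw [PySem.Chars.splitOn.go]
      split
      · exact le_trans (by simp) (ih ..)
      · exact ih ..

-- Python's s.split(sep) never returns the empty list.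
lemma pv_splitOn_ne_nil (s sep : List Char) : PySem.Chars.splitOn s sep ≠ [] := by
  have h := pv_go_len (s.length + 1) sep s [] []
  intro hc
  rw [PySem.Chars.splitOn] at hc
  simp [hc] at h

-- A's loop body does not depend on the loop variable: it appends constants.
lemma pv_foldl_const {α : Type} (x y z : String) :
    ∀ (l : List α) (a b c : List String),
      l.foldl (fun (acc : List String × List String × List String) _ =>
          (acc.1 ++ [x], acc.2.1 ++ [y], acc.2.2 ++ [z])) (a, b, c)
        = (a ++ List.replicate l.length x, b ++ List.replicate l.length y,
           c ++ List.replicate l.length z) := by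
  intro l
  induction l with
  | nil => intro a b c; simp
  | cons h t ih =>
    intro a b c
    simp only [List.foldl_cons, ih, List.length_cons, List.replicate_succ]
    simp

lemma pv_set_ofList_replicate (x : String) (n : Nat) (hn : 1 ≤ n) :
    PySem.Set.ofList (List.replicate n x) = [x] := by
  induction n with
  | zero => omega
  | succ m ih =>
    cases m with
    | zero => simp [PySem.Set.ofList, PySem.Set.add, PySem.Set.contains]
    | succ k =>
      rw [List.replicate_succ']
      have hmem : x ∈ PySem.Set.ofList (List.replicate (k + 1) x) := by
        rw [ih (by omega)]; simp
      calc PySem.Set.ofList (List.replicate (k + 1) x ++ [x])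
          = PySem.Set.add (PySem.Set.ofList (List.replicate (k + 1) x)) x := by
            simp [PySem.Set.ofList_eq_foldl, PySem.Set.add]
        _ = [x] := by
            rw [PySem.Set.add_of_mem hmem, ih (by omega)]

lemma pv_join_singleton (sep : String) (x : String) :
    PySem.Str.join sep [x] = x := by
  simp [PySem.Str.join, PySem.Chars.join_singleton]

-- '|'.join(list(set(n copies of x))) is x once the loop ran at least once.
lemma pv_join_replicate (sep x : String) (n : Nat) (hn : 1 ≤ n) :
    PySem.Str.join sep (PySem.Set.ofList (List.replicate n x)) = x := by
  rw [pv_set_ofList_replicate _ _ hn, pv_join_singleton]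

-- ===== VERDICT (by name: the statement is the Claim_ definition above) =====
theorem extractAnnotaion_spec : Claim_equal_extractAnnotaion := by
  intro strs _hdom hpre
  unfold Spec_extractAnnotaion extractAnnotaion extractAnnotaion_alt
  have hne := pv_splitOn_ne_nil strs.toList ",".toList
  have hlen : 1 ≤ (PySem.Chars.splitOn strs.toList ",".toList).length :=
    Nat.one_le_iff_ne_zero.mpr (fun h => hne (List.length_eq_zero_iff.mp h))
  simp only []
  rw [pv_foldl_const]
  unfold Pre_extractAnnotaion at hpre
  have h9 : 9 < ((PySem.Chars.splitOn strs.toList "|".toList).map String.ofList).length := by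
    simp only [List.length_map]; omega
  rw [PySem.List.pyGet?_of_nonneg _ (by norm_num : (0:Int) ≤ 1),
      PySem.List.pyGet?_of_nonneg _ (by norm_num : (0:Int) ≤ 3),
      PySem.List.pyGet?_of_nonneg _ (by norm_num : (0:Int) ≤ 9)]
  norm_num
  rw [List.getElem?_eq_getElem (by omega), List.getElem?_eq_getElem (by omega),
      List.getElem?_eq_getElem (by omega)]
  simp only [List.nil_append, Option.getD_some, List.length_map]
  refine ⟨?_, ?_, ?_⟩ <;>
    first
      | exact pv_join_replicate _ _ _ hlen
      | · rw [pv_join_replicate _ _ _ hlen]
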